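-- pv_equiv track=rewrite | github.com/williamhogman/aoc | 2020/py/day21.py | exclusive
-- ===== SOURCE A (Python) =====
-- def setel(s):
--     return next(iter(s))
--
-- def exclusive(xs):
--     xs = list(xs)
--     changed = True
--     while changed:
--         changed = False
--         for x in xs:
--             if len(x) != 1:
--                 continue
--             r = setel(x)
--             for y in xs:
--                 if r in y and len(y) > 1:
--                     y.remove(r)
--                     changed = True
--     return xs
-- ===== SOURCE B (Python) =====
-- def exclusive(xs):
--     xs = list(xs)
--     # inverted index: value -> ordered positions of lists that (initially) contain it,
--     # one entry per position even if the value occurs several times in that list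
--     occ = {}
--     for j, y in enumerate(xs):
--         for v in y:
--             l = occ.setdefault(v, [])
--             if not l or l[-1] != j:
--                 l.append(j)
--     changed = True
--     while changed:
--         changed = False
--         for x in xs:
--             if len(x) != 1:
--                 continue
--             r = next(iter(x))
--             for j in occ.get(r, ()):
--                 y = xs[j]
--                 if len(y) > 1 and r in y:
--                     y.remove(r)
--                     changed = True
--     return xs
-- ===== Notes on version B (the rewrite author's own statement) =====
-- stated objective: alternative
-- what changed: B builds an inverted index value->positions once up front, so each singleton's elimination touches only the lists that contain its value instead of rescanning (and membership-testing) every list; A's sweep-until-fixpoint order is preserved exactly.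
import Mathlib
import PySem

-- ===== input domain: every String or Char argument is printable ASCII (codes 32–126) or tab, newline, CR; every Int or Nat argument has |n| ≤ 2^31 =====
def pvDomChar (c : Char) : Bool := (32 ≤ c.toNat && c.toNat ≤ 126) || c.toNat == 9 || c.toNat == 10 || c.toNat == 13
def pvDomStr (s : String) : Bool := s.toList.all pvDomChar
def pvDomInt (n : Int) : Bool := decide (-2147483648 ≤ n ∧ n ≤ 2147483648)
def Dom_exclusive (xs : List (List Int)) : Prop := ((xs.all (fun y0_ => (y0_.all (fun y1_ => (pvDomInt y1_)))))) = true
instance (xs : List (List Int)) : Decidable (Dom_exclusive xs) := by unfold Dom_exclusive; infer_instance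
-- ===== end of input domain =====

-- B replaces A's inner rescan of every list by an inverted index value -> positions built once,
-- keeping A's sweep-until-fixpoint order exactly (objective: alternative).
-- Both Pythons mutate the caller's inner lists in place identically; the theorems are about the return value.

-- ===== PORT A =====
-- total length of all inner lists: the termination measure of the while-loop
def pvSumLen (xs : List (List Int)) : Nat := (xs.map List.length).sum

-- one step of the outer 'for x in xs' loop at position i; the inner 'for y in xs' loop
-- conditionally rewrites each y independently (each y is mutated only at its own iteration),
-- so it is the map below, and 'changed' becomes true iff some y satisfied the condition.
def pvStepA (s : List (List Int) × Bool) (i : Nat) : List (List Int) × Bool :=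
  let x := s.1.getD i []
  if x.length = 1 then
    let r := x.getD 0 0
    (s.1.map (fun y => if r ∈ y ∧ 1 < y.length then y.erase r else y),
     s.2 || s.1.any (fun y => decide (r ∈ y) && decide (1 < y.length)))
  else s

-- one pass of the while-body ('for x in xs' over the current states; the list's length never changes)
def pvPassA (xs : List (List Int)) : List (List Int) × Bool :=
  (List.range xs.length).foldl pvStepA (xs, false)

theorem pvErase_len_le (r : Int) (y : List Int) :
    (if r ∈ y ∧ 1 < y.length then y.erase r else y).length ≤ y.length := by
  split
  · exact List.Sublist.length_le List.erase_sublist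
  · exact le_refl _

theorem pvStepA_sum_le (s : List (List Int) × Bool) (i : Nat) :
    pvSumLen (pvStepA s i).1 ≤ pvSumLen s.1 := by
  unfold pvStepA pvSumLen
  simp only []
  split
  · simp only [List.map_map]
    exact List.sum_le_sum (fun y _ => pvErase_len_le _ y)
  · exact le_refl _

theorem pvStepA_flag (s : List (List Int) × Bool) (i : Nat) :
    (pvStepA s i).2 = true → s.2 = true ∨ pvSumLen (pvStepA s i).1 < pvSumLen s.1 := by
  unfold pvStepA
  simp only []
  split
  · intro h
    rcases Bool.or_eq_true_iff.mp h with h | h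
    · exact Or.inl h
    · right
      rcases List.any_eq_true.mp h with ⟨y, hy, hcond⟩
      simp only [Bool.and_eq_true, decide_eq_true_eq] at hcond
      unfold pvSumLen
      simp only [List.map_map]
      refine List.sum_lt_sum _ _ (fun z _ => pvErase_len_le _ z) ⟨y, hy, ?_⟩
      simp only [Function.comp]
      rw [if_pos ⟨hcond.1, hcond.2⟩]
      have := List.length_erase (a := (s.1.getD i []).getD 0 0) (l := y)
      rw [this, if_pos hcond.1]
      omega
  · intro h
    exact Or.inl h

theorem pvFoldA_sum (l : List Nat) (s : List (List Int) × Bool) :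
    pvSumLen (l.foldl pvStepA s).1 ≤ pvSumLen s.1 ∧
      ((l.foldl pvStepA s).2 = true → s.2 = true ∨ pvSumLen (l.foldl pvStepA s).1 < pvSumLen s.1) := by
  induction l generalizing s with
  | nil => exact ⟨le_refl _, fun h => Or.inl h⟩
  | cons i l ih =>
    simp only [List.foldl_cons]
    obtain ⟨h1, h2⟩ := ih (pvStepA s i)
    refine ⟨le_trans h1 (pvStepA_sum_le s i), fun h => ?_⟩
    rcases h2 h with h | h
    · rcases pvStepA_flag s i h with h' | h'
      · exact Or.inl h'
      · exact Or.inr (lt_of_le_of_lt h1 h')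
    · exact Or.inr (lt_of_lt_of_le h (pvStepA_sum_le s i))

theorem pvPassA_decreases (xs : List (List Int)) :
    (pvPassA xs).2 = true → pvSumLen (pvPassA xs).1 < pvSumLen xs := by
  intro h
  rcases (pvFoldA_sum (List.range xs.length) (xs, false)).2 h with h' | h'
  · simp at h'
  · exact h'

-- 'while changed:' — run a pass, repeat while it reports a change
def pvLoopA (xs : List (List Int)) : List (List Int) :=
  let p := pvPassA xs
  if h : p.2 = true then pvLoopA p.1 else p.1
termination_by pvSumLen xs
decreasing_by exact pvPassA_decreases xs ‹_›

def exclusive (xs : List (List Int)) : List (List Int) := pvLoopA xs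

-- ===== PORT B =====
-- occ.setdefault(v, []); append j unless it is already the last stored position
def pvOccAdd (j : Nat) (d : PySem.Dict Int (List Nat)) (v : Int) : PySem.Dict Int (List Nat) :=
  let d := d.setdefault v []
  let l := d.getD v []
  if l = [] ∨ l.getLast? ≠ some j then d.insert v (l ++ [j]) else d

-- 'for j, y in enumerate(xs): for v in y: ...' (positions kept as Nat: they are list indices ≥ 0)
def pvBuildOcc (xs : List (List Int)) : PySem.Dict Int (List Nat) :=
  xs.zipIdx.foldl (fun d p => p.1.foldl (fun d v => pvOccAdd p.2 d v) d) PySem.Dict.empty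

-- one step of B's outer loop: visit only the positions the index lists for r
def pvStepB (occ : PySem.Dict Int (List Nat)) (s : List (List Int) × Bool) (i : Nat) :
    List (List Int) × Bool :=
  let x := s.1.getD i []
  if x.length = 1 then
    let r := x.getD 0 0
    (occ.getD r []).foldl (fun t j =>
      let y := t.1.getD j []
      if 1 < y.length ∧ r ∈ y then (t.1.set j (y.erase r), true) else t) s
  else s

def pvPassB (occ : PySem.Dict Int (List Nat)) (xs : List (List Int)) : List (List Int) × Bool :=
  (List.range xs.length).foldl (pvStepB occ) (xs, false)

theorem pvSumLen_set_lt (xs : List (List Int)) (j : Nat) (v : List Int)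
    (hv : v.length < (xs.getD j []).length) : pvSumLen (xs.set j v) < pvSumLen xs := by
  induction xs generalizing j with
  | nil => simp [List.getD] at hv
  | cons a t ih =>
    cases j with
    | zero =>
      simp only [List.getD_cons_zero] at hv
      simp only [List.set_cons_zero, pvSumLen, List.map_cons, List.sum_cons]
      omega
    | succ j =>
      simp only [List.getD_cons_succ] at hv
      simp only [List.set_cons_succ, pvSumLen, List.map_cons, List.sum_cons]
      have := ih j hv
      unfold pvSumLen at this
      omega

theorem pvFoldBinner_sum (r : Int) (L : List Nat) (t : List (List Int) × Bool) :
    pvSumLen (L.foldl (fun t j =>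
      let y := t.1.getD j []
      if 1 < y.length ∧ r ∈ y then (t.1.set j (y.erase r), true) else t) t).1 ≤ pvSumLen t.1 ∧
    ((L.foldl (fun t j =>
      let y := t.1.getD j []
      if 1 < y.length ∧ r ∈ y then (t.1.set j (y.erase r), true) else t) t).2 = true →
      t.2 = true ∨ pvSumLen (L.foldl (fun t j =>
      let y := t.1.getD j []
      if 1 < y.length ∧ r ∈ y then (t.1.set j (y.erase r), true) else t) t).1 < pvSumLen t.1) := by
  induction L generalizing t with
  | nil => exact ⟨le_refl _, fun h => Or.inl h⟩
  | cons j L ih =>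
    simp only [List.foldl_cons]
    set t' := (let y := t.1.getD j []
      if 1 < y.length ∧ r ∈ y then (t.1.set j (y.erase r), true) else t) with ht'
    have hstep : pvSumLen t'.1 ≤ pvSumLen t.1 ∧ (t'.2 = true → t.2 = true ∨ pvSumLen t'.1 < pvSumLen t.1) := by
      rw [ht']
      simp only []
      split
      · rename_i hcond
        have hlt : ((t.1.getD j []).erase r).length < (t.1.getD j []).length := by
          rw [List.length_erase, if_pos hcond.2]
          omega
        have := pvSumLen_set_lt t.1 j _ hlt
        exact ⟨le_of_lt this, fun _ => Or.inr this⟩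
      · exact ⟨le_refl _, fun h => Or.inl h⟩
    obtain ⟨h1, h2⟩ := ih t'
    refine ⟨le_trans h1 hstep.1, fun h => ?_⟩
    rcases h2 h with h | h
    · rcases hstep.2 h with h' | h'
      · exact Or.inl h'
      · exact Or.inr (lt_of_le_of_lt h1 h')
    · exact Or.inr (lt_of_lt_of_le h hstep.1)

theorem pvStepB_sum (occ : PySem.Dict Int (List Nat)) (s : List (List Int) × Bool) (i : Nat) :
    pvSumLen (pvStepB occ s i).1 ≤ pvSumLen s.1 ∧
    ((pvStepB occ s i).2 = true → s.2 = true ∨ pvSumLen (pvStepB occ s i).1 < pvSumLen s.1) := by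
  unfold pvStepB
  simp only []
  split
  · exact pvFoldBinner_sum _ _ s
  · exact ⟨le_refl _, fun h => Or.inl h⟩

theorem pvPassB_decreases (occ : PySem.Dict Int (List Nat)) (xs : List (List Int)) :
    (pvPassB occ xs).2 = true → pvSumLen (pvPassB occ xs).1 < pvSumLen xs := by
  have main : ∀ (l : List Nat) (s : List (List Int) × Bool),
      pvSumLen (l.foldl (pvStepB occ) s).1 ≤ pvSumLen s.1 ∧
      ((l.foldl (pvStepB occ) s).2 = true → s.2 = true ∨
        pvSumLen (l.foldl (pvStepB occ) s).1 < pvSumLen s.1) := by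
    intro l
    induction l with
    | nil => exact fun s => ⟨le_refl _, fun h => Or.inl h⟩
    | cons i l ih =>
      intro s
      simp only [List.foldl_cons]
      obtain ⟨h1, h2⟩ := ih (pvStepB occ s i)
      refine ⟨le_trans h1 (pvStepB_sum occ s i).1, fun h => ?_⟩
      rcases h2 h with h | h
      · rcases (pvStepB_sum occ s i).2 h with h' | h'
        · exact Or.inl h'
        · exact Or.inr (lt_of_le_of_lt h1 h')
      · exact Or.inr (lt_of_lt_of_le h (pvStepB_sum occ s i).1)
  intro h
  rcases (main (List.range xs.length) (xs, false)).2 h with h' | h'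
  · simp at h'
  · exact h'

def pvLoopB (occ : PySem.Dict Int (List Nat)) (xs : List (List Int)) : List (List Int) :=
  let p := pvPassB occ xs
  if h : p.2 = true then pvLoopB occ p.1 else p.1
termination_by pvSumLen xs
decreasing_by exact pvPassB_decreases occ xs h

def exclusive_alt (xs : List (List Int)) : List (List Int) := pvLoopB (pvBuildOcc xs) xs

-- ===== PRECONDITION & SPEC =====
def Spec_exclusive (xs : List (List Int)) (out : List (List Int)) : Prop := out = exclusive_alt xs
instance (xs : List (List Int)) (out : List (List Int)) : Decidable (Spec_exclusive xs out) := by unfold Spec_exclusive; infer_instance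

-- ===== CLAIM (what is proved, stated in full; the proofs are below) =====
def Claim_equal_exclusive : Prop := ∀ (xs : List (List Int)), Dom_exclusive xs → Spec_exclusive xs (exclusive xs)

-- ===== LEMMAS AND PROOFS =====

-- invariant while building up to position j: every stored index list is strictly increasing and bounded by j
def pvBInv (d : PySem.Dict Int (List Nat)) (j : Nat) : Prop :=
  ∀ w, (d.getD w []).Pairwise (· < ·) ∧ ∀ i ∈ d.getD w [], i ≤ j

theorem pvOccAdd_getD_other (j : Nat) (d : PySem.Dict Int (List Nat)) (v w : Int) (h : w ≠ v) :
    (pvOccAdd j d v).getD w [] = d.getD w [] := by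
  unfold pvOccAdd
  simp only []
  split
  · rw [PySem.Dict.getD_insert_of_ne _ _ _ h, PySem.Dict.getD_eq_get?_getD,
      PySem.Dict.get?_setdefault_of_ne _ _ h, ← PySem.Dict.getD_eq_get?_getD]
  · rw [PySem.Dict.getD_eq_get?_getD, PySem.Dict.get?_setdefault_of_ne _ _ h,
      ← PySem.Dict.getD_eq_get?_getD]

theorem pvOccAdd_getD_self (j : Nat) (d : PySem.Dict Int (List Nat)) (v : Int) :
    (pvOccAdd j d v).getD v [] =
      if d.getD v [] = [] ∨ (d.getD v []).getLast? ≠ some j then d.getD v [] ++ [j]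
      else d.getD v [] := by
  unfold pvOccAdd
  simp only [PySem.Dict.getD_setdefault_self]
  split
  · rw [PySem.Dict.getD_insert_self]
  · rw [PySem.Dict.getD_setdefault_self]

theorem pvOccAdd_mono (j : Nat) (d : PySem.Dict Int (List Nat)) (v w : Int) (i : Nat)
    (h : i ∈ d.getD w []) : i ∈ (pvOccAdd j d v).getD w [] := by
  by_cases hw : w = v
  · subst hw
    rw [pvOccAdd_getD_self]
    split
    · exact List.mem_append_left _ h
    · exact h
  · rw [pvOccAdd_getD_other _ _ _ _ hw]; exact h

theorem pvOccAdd_self_mem (j : Nat) (d : PySem.Dict Int (List Nat)) (v : Int) :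
    j ∈ (pvOccAdd j d v).getD v [] := by
  rw [pvOccAdd_getD_self]
  split
  · exact List.mem_append_right _ (List.mem_singleton_self j)
  · rename_i h
    push_neg at h
    exact List.mem_of_getLast? h.2

-- in a strictly increasing list bounded by j, membership of j forces it to be the last element
theorem pvMem_getLast (l : List Nat) (j : Nat) (hs : l.Pairwise (· < ·))
    (hb : ∀ i ∈ l, i ≤ j) (hj : j ∈ l) : l.getLast? = some j := by
  induction l with
  | nil => simp at hj
  | cons a t ih =>
    cases t with
    | nil =>
      simp at hj
      simp [hj]
    | cons b t' =>
      rw [List.getLast?_cons_cons]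
      rcases List.mem_cons.mp hj with h | h
      · exfalso
        have hab : a < b := (List.pairwise_cons.mp hs).1 b (List.mem_cons_self)
        have := hb b (List.mem_cons_of_mem a List.mem_cons_self)
        omega
      · exact ih (List.pairwise_cons.mp hs).2 (fun i hi => hb i (List.mem_cons_of_mem a hi)) h

theorem pvOccAdd_binv (j : Nat) (d : PySem.Dict Int (List Nat)) (v : Int)
    (h : pvBInv d j) : pvBInv (pvOccAdd j d v) j := by
  intro w
  by_cases hw : w = v
  · subst hw
    rw [pvOccAdd_getD_self]
    split
    · rename_i hg
      obtain ⟨hp, hb⟩ := h w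
      constructor
      · rw [List.pairwise_append]
        refine ⟨hp, List.pairwise_singleton _ _, fun a ha b hb' => ?_⟩
        rw [List.mem_singleton] at hb'
        subst hb'
        have haj := hb a ha
        rcases Nat.lt_or_ge a b with h' | h'
        · exact h'
        · have : a = b := le_antisymm haj h'
          subst this
          exfalso
          rcases hg with hg | hg
          · rw [hg] at ha; simp at ha
          · exact hg (pvMem_getLast _ _ hp hb ha)
      · intro i hi
        rcases List.mem_append.mp hi with hi | hi
        · exact hb i hi
        · rw [List.mem_singleton] at hi; omega
    · exact h w
  · rw [pvOccAdd_getD_other _ _ _ _ hw]; exact h w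

theorem pvBInv_mono (d : PySem.Dict Int (List Nat)) (j k : Nat) (hjk : j ≤ k)
    (h : pvBInv d j) : pvBInv d k :=
  fun w => ⟨(h w).1, fun i hi => le_trans ((h w).2 i hi) hjk⟩

-- inner loop 'for v in y'
theorem pvInnerFold (y : List Int) (j : Nat) (d : PySem.Dict Int (List Nat)) (h : pvBInv d j) :
    pvBInv (y.foldl (fun d v => pvOccAdd j d v) d) j ∧
    (∀ w i, i ∈ d.getD w [] → i ∈ (y.foldl (fun d v => pvOccAdd j d v) d).getD w []) ∧
    (∀ v ∈ y, j ∈ (y.foldl (fun d v => pvOccAdd j d v) d).getD v []) := by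
  induction y generalizing d with
  | nil => exact ⟨h, fun w i hi => hi, fun v hv => absurd hv (List.not_mem_nil)⟩
  | cons v y ih =>
    simp only [List.foldl_cons]
    obtain ⟨h1, h2, h3⟩ := ih (pvOccAdd j d v) (pvOccAdd_binv j d v h)
    refine ⟨h1, fun w i hi => h2 w i (pvOccAdd_mono j d v w i hi), fun v' hv' => ?_⟩
    rcases List.mem_cons.mp hv' with hv' | hv'
    · subst hv'
      exact h2 v' j (pvOccAdd_self_mem j d v')
    · exact h3 v' hv'

-- outer loop 'for j, y in enumerate(xs)'
theorem pvOuterFold (l : List (List Int)) (k : Nat) (d : PySem.Dict Int (List Nat))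
    (h : pvBInv d k) :
    pvBInv ((l.zipIdx k).foldl (fun d p => p.1.foldl (fun d v => pvOccAdd p.2 d v) d) d)
      (k + l.length) ∧
    (∀ w i, i ∈ d.getD w [] →
      i ∈ ((l.zipIdx k).foldl (fun d p => p.1.foldl (fun d v => pvOccAdd p.2 d v) d) d).getD w []) ∧
    (∀ p ∈ l.zipIdx k, ∀ v ∈ p.1,
      p.2 ∈ ((l.zipIdx k).foldl (fun d p => p.1.foldl (fun d v => pvOccAdd p.2 d v) d) d).getD v []) := by
  induction l generalizing k d with
  | nil => exact ⟨pvBInv_mono d k _ (by omega) h, fun w i hi => hi, by simp⟩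
  | cons y l ih =>
    simp only [List.zipIdx_cons, List.foldl_cons]
    obtain ⟨hin1, hin2, hin3⟩ := pvInnerFold y k d h
    obtain ⟨h1, h2, h3⟩ := ih (k + 1) _ (pvBInv_mono _ k (k + 1) (by omega) hin1)
    refine ⟨by simpa [Nat.add_assoc, Nat.add_comm 1 l.length] using h1,
      fun w i hi => h2 w i (hin2 w i hi), fun p hp v hv => ?_⟩
    rcases List.mem_cons.mp hp with hp | hp
    · subst hp
      exact h2 v k (hin3 v hv)
    · exact h3 p hp v hv

-- coverage: the index lists every position whose current list still contains the value
def pvCov (occ : PySem.Dict Int (List Nat)) (cur : List (List Int)) : Prop :=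
  ∀ j r, r ∈ cur.getD j [] → j ∈ occ.getD r []

-- every index list is strictly increasing (hence Nodup)
def pvInc (occ : PySem.Dict Int (List Nat)) : Prop :=
  ∀ v, (occ.getD v []).Pairwise (· < ·)

theorem pvBuildOcc_inc (xs : List (List Int)) : pvInc (pvBuildOcc xs) := by
  intro v
  have h0 : pvBInv PySem.Dict.empty 0 := by
    intro w
    simp [PySem.Dict.getD_empty]
  exact ((pvOuterFold xs 0 PySem.Dict.empty h0).1 v).1

theorem pvBuildOcc_cov (xs : List (List Int)) : pvCov (pvBuildOcc xs) xs := by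
  intro j r hr
  have h0 : pvBInv PySem.Dict.empty 0 := by
    intro w
    simp [PySem.Dict.getD_empty]
  have hj : j < xs.length := by
    by_contra hlt
    push_neg at hlt
    rw [List.getD_eq_getElem?_getD, List.getElem?_eq_none hlt] at hr
    simp at hr
  have hget : xs.getD j [] = xs[j] := by
    rw [List.getD_eq_getElem?_getD, List.getElem?_eq_getElem hj]
    rfl
  have hmem : (xs[j], j) ∈ xs.zipIdx := by
    rw [List.mem_zipIdx_iff_getElem?]
    exact List.getElem?_eq_getElem hj
  exact (pvOuterFold xs 0 PySem.Dict.empty h0).2.2 (xs[j], j) hmem r (hget ▸ hr)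
-- specification of B's inner fold over the (Nodup) index list L
theorem pvFoldErase_spec (r : Int) (L : List Nat) (hN : L.Nodup)
    (cur : List (List Int)) (c : Bool) :
    (L.foldl (fun t j =>
        if 1 < (t.1.getD j []).length ∧ r ∈ t.1.getD j []
        then (t.1.set j ((t.1.getD j []).erase r), true) else t) (cur, c)).1.length
        = cur.length ∧
    (∀ j, j ∉ L → (L.foldl (fun t j =>
        if 1 < (t.1.getD j []).length ∧ r ∈ t.1.getD j []
        then (t.1.set j ((t.1.getD j []).erase r), true) else t) (cur, c)).1[j]?
        = cur[j]?) ∧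
    (∀ j, j ∈ L → (L.foldl (fun t j =>
        if 1 < (t.1.getD j []).length ∧ r ∈ t.1.getD j []
        then (t.1.set j ((t.1.getD j []).erase r), true) else t) (cur, c)).1[j]?
        = cur[j]?.map (fun y => if 1 < y.length ∧ r ∈ y then y.erase r else y)) ∧
    (L.foldl (fun t j =>
        if 1 < (t.1.getD j []).length ∧ r ∈ t.1.getD j []
        then (t.1.set j ((t.1.getD j []).erase r), true) else t) (cur, c)).2
      = (c || L.any (fun j => decide (1 < (cur.getD j []).length ∧ r ∈ cur.getD j []))) := by
  induction L generalizing cur c with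
  | nil => exact ⟨rfl, fun j _ => rfl, fun j hj => absurd hj (List.not_mem_nil), by simp⟩
  | cons j L ih =>
    have hj : j ∉ L := (List.nodup_cons.mp hN).1
    have hL : L.Nodup := (List.nodup_cons.mp hN).2
    simp only [List.foldl_cons]
    by_cases hcond : 1 < (cur.getD j []).length ∧ r ∈ cur.getD j []
    · have hjlen : j < cur.length := by
        by_contra hge
        push_neg at hge
        rw [List.getD_eq_getElem?_getD, List.getElem?_eq_none hge] at hcond
        simp at hcond
      rw [if_pos hcond]
      obtain ⟨ih1, ih2, ih3, ih4⟩ := ih hL (cur.set j ((cur.getD j []).erase r)) true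
      refine ⟨by rw [ih1, List.length_set], fun j' hj' => ?_, fun j' hj' => ?_, ?_⟩
      · have hne : j' ≠ j := fun h => hj' (h ▸ List.mem_cons_self)
        rw [ih2 j' (fun h => hj' (List.mem_cons_of_mem _ h)),
          List.getElem?_set_ne (fun h => hne h.symm)]
      · rcases List.mem_cons.mp hj' with hj' | hj'
        · subst hj'
          rw [ih2 j' hj, List.getElem?_set_self hjlen]
          have hcur : cur[j']? = some (cur.getD j' []) := by
            rw [List.getD_eq_getElem?_getD, List.getElem?_eq_getElem hjlen]
            rfl
          rw [hcur, Option.map_some, if_pos hcond]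
        · have hne : j' ≠ j := fun h => hj (h ▸ hj')
          rw [ih3 j' hj', List.getElem?_set_ne (fun h => hne h.symm)]
      · rw [ih4, List.any_cons, decide_eq_true hcond]
        simp
    · rw [if_neg hcond]
      obtain ⟨ih1, ih2, ih3, ih4⟩ := ih hL cur c
      refine ⟨ih1, fun j' hj' => ih2 j' (fun h => hj' (List.mem_cons_of_mem _ h)),
        fun j' hj' => ?_, ?_⟩
      · rcases List.mem_cons.mp hj' with hj' | hj'
        · subst hj'
          by_cases hjL : j' ∈ L
          · exact ih3 j' hjL
          · rw [ih2 j' hjL]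
            cases hy : cur[j']? with
            | none => rfl
            | some y =>
              have hyd : cur.getD j' [] = y := by
                rw [List.getD_eq_getElem?_getD, hy]; rfl
              rw [hyd] at hcond
              rw [Option.map_some, if_neg hcond]
        · exact ih3 j' hj'
      · rw [ih4, List.any_cons, decide_eq_false hcond, Bool.false_or]
theorem pvStepA_cov (occ : PySem.Dict Int (List Nat)) (s : List (List Int) × Bool) (i : Nat)
    (h : pvCov occ s.1) : pvCov occ (pvStepA s i).1 := by
  unfold pvStepA
  simp only []
  split
  · intro j r' hr'
    rw [List.getD_eq_getElem?_getD, List.getElem?_map] at hr'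
    cases hy : s.1[j]? with
    | none => rw [hy] at hr'; simp at hr'
    | some y =>
      rw [hy, Option.map_some, Option.getD_some] at hr'
      have hmem : r' ∈ y := by
        split at hr'
        · exact List.mem_of_mem_erase hr'
        · exact hr'
      apply h j r'
      rw [List.getD_eq_getElem?_getD, hy, Option.getD_some]
      exact hmem
  · exact h

theorem pvStepB_eq_stepA (occ : PySem.Dict Int (List Nat)) (s : List (List Int) × Bool) (i : Nat)
    (hc : pvCov occ s.1) (hi : pvInc occ) : pvStepB occ s i = pvStepA s i := by
  obtain ⟨cur, c⟩ := s
  have hc' : ∀ j r, r ∈ cur.getD j [] → j ∈ occ.getD r [] := hc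
  unfold pvStepB pvStepA
  simp only []
  split
  · set r := (cur.getD i []).getD 0 0 with hr
    have hN : (occ.getD r []).Nodup := (hi r).nodup
    obtain ⟨h1, h2, h3, h4⟩ := pvFoldErase_spec r (occ.getD r []) hN cur c
    refine Prod.ext ?_ ?_
    · apply List.ext_getElem?
      intro j
      rw [List.getElem?_map]
      by_cases hj : j ∈ occ.getD r []
      · rw [h3 j hj]
        cases hyy : cur[j]? with
        | none => rfl
        | some y =>
          simp only [Option.map_some]
          congr 1
          exact if_congr and_comm rfl rfl
      · rw [h2 j hj]
        cases hyy : cur[j]? with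
        | none => rfl
        | some y =>
          have hyd : cur.getD j [] = y := by
            rw [List.getD_eq_getElem?_getD, hyy, Option.getD_some]
          have hnr : r ∉ y := fun hmem => hj (hc' j r (hyd ▸ hmem))
          simp only [Option.map_some]
          rw [if_neg (fun h : r ∈ y ∧ 1 < y.length => hnr h.1)]
    · rw [h4]
      congr 1
      rw [Bool.eq_iff_iff]
      simp only [List.any_eq_true, decide_eq_true_eq, Bool.and_eq_true]
      constructor
      · rintro ⟨j, hjL, hlen, hmem⟩
        have hjlt : j < cur.length := by
          by_contra hge
          push_neg at hge
          rw [List.getD_eq_getElem?_getD, List.getElem?_eq_none hge] at hlen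
          simp at hlen
        refine ⟨cur.getD j [], ?_, hmem, hlen⟩
        rw [List.getD_eq_getElem?_getD, List.getElem?_eq_getElem hjlt, Option.getD_some]
        exact List.getElem_mem hjlt
      · rintro ⟨y, hy, hmem, hlen⟩
        obtain ⟨j, hjlt, hval⟩ := List.mem_iff_getElem.mp hy
        have hyd : cur.getD j [] = y := by
          rw [List.getD_eq_getElem?_getD, List.getElem?_eq_getElem hjlt, Option.getD_some, hval]
        exact ⟨j, hc' j r (hyd ▸ hmem), hyd ▸ hlen, hyd ▸ hmem⟩
  · rfl

theorem pvFoldPass_eq (occ : PySem.Dict Int (List Nat)) (l : List Nat)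
    (s : List (List Int) × Bool) (hc : pvCov occ s.1) (hi : pvInc occ) :
    l.foldl (pvStepB occ) s = l.foldl pvStepA s ∧ pvCov occ (l.foldl pvStepA s).1 := by
  induction l generalizing s with
  | nil => exact ⟨rfl, hc⟩
  | cons i l ih =>
    simp only [List.foldl_cons]
    rw [pvStepB_eq_stepA occ s i hc hi]
    exact ih (pvStepA s i) (pvStepA_cov occ s i hc)

theorem pvPassB_eq_passA (occ : PySem.Dict Int (List Nat)) (xs : List (List Int))
    (hc : pvCov occ xs) (hi : pvInc occ) :
    pvPassB occ xs = pvPassA xs ∧ pvCov occ (pvPassA xs).1 := by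
  unfold pvPassB pvPassA
  exact pvFoldPass_eq occ (List.range xs.length) (xs, false) hc hi
theorem pvLoopB_eq_loopA (occ : PySem.Dict Int (List Nat)) (xs : List (List Int))
    (hc : pvCov occ xs) (hi : pvInc occ) : pvLoopB occ xs = pvLoopA xs := by
  rw [pvLoopB, pvLoopA]
  obtain ⟨hEq, hCov'⟩ := pvPassB_eq_passA occ xs hc hi
  rw [hEq]
  split
  · rename_i h
    exact pvLoopB_eq_loopA occ (pvPassA xs).1 hCov' hi
  · rfl
termination_by pvSumLen xs
decreasing_by exact pvPassA_decreases xs ‹_›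


-- ===== VERDICT (by name: the statement is the Claim_ definition above) =====
theorem exclusive_spec : Claim_equal_exclusive := by
  intro xs _
  unfold Spec_exclusive exclusive exclusive_alt
  exact (pvLoopB_eq_loopA (pvBuildOcc xs) xs (pvBuildOcc_cov xs) (pvBuildOcc_inc xs)).symm
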